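-- pv_equiv track=rewrite | github.com/marian37/advent-of-code-2023 | 14.py | part2
-- ===== SOURCE A (Python) =====
-- def slideNorth(transformed):
--     for r in range(len(transformed)):
--         for c in range(len(transformed[r])):
--             if transformed[r][c] == "O":
--                 newR = r - 1
--                 while newR >= 0 and transformed[newR][c] == ".":
--                     newR -= 1
--                 newR += 1
--                 transformed[r][c] = "."
--                 transformed[newR][c] = "O"
--     return transformed
--
-- def slideWest(transformed):
--     for r in range(len(transformed)):
--         for c in range(len(transformed[r])):
--             if transformed[r][c] == "O":
--                 newC = c - 1
--                 while newC >= 0 and transformed[r][newC] == ".":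
--                     newC -= 1
--                 newC += 1
--                 transformed[r][c] = "."
--                 transformed[r][newC] = "O"
--     return transformed
--
-- def slideSouth(transformed):
--     for r in range(len(transformed) - 1, -1, -1):
--         for c in range(len(transformed[r])):
--             if transformed[r][c] == "O":
--                 newR = r + 1
--                 while newR < len(transformed) and transformed[newR][c] == ".":
--                     newR += 1
--                 newR -= 1
--                 transformed[r][c] = "."
--                 transformed[newR][c] = "O"
--     return transformed
--
-- def slideEast(transformed):
--     for r in range(len(transformed)):
--         for c in range(len(transformed[r]) - 1, -1, -1):
--             if transformed[r][c] == "O":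
--                 newC = c + 1
--                 while newC < len(transformed[r]) and transformed[r][newC] == ".":
--                     newC += 1
--                 newC -= 1
--                 transformed[r][c] = "."
--                 transformed[r][newC] = "O"
--     return transformed
--
-- def calculateNorthSupportBeams(transformed):
--     result = 0
--     for r in range(len(transformed)):
--         c = transformed[r].count("O")
--         result += c * (len(transformed) - r)
--     return result
--
-- def checkPeriod(beams, period):
--     return beams[-period:] == beams[-2 * period : -period]
--
-- def part2(input):
--     t = []
--     for r in range(len(input)):
--         t.append([])
--         for c in range(len(input[r])):
--             t[-1].append(input[r][c])
--     supportBeams = [calculateNorthSupportBeams(t)]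
--     m = supportBeams[0]
--     i = 0
--     c = 0
--     period = 0
--     while True:
--         t = slideNorth(t)
--         t = slideWest(t)
--         t = slideSouth(t)
--         t = slideEast(t)
--         c += 1
--         beams = calculateNorthSupportBeams(t)
--         if beams < m:
--             m = beams
--             i = c
--         elif beams == m and c - i > 5:
--             period = c - i
--             if checkPeriod(supportBeams, period):
--                 break
--             m = beams
--             i = c
--         supportBeams.append(beams)
--     index = (1000000000 - c) % period
--     return supportBeams[-period:][index]
-- ===== SOURCE B (Python) =====
-- # B: each tilt rewrites whole lines by run-length packing (split on walls, emit
-- # O's then .'s per run); north/south via transpose / row-reversal instead of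
-- # per-rock scanning, and the history is kept most-recent-first.
--
-- def _pack(cells):
--     out = []
--     o = d = 0
--     for v in cells:
--         if v == "O":
--             o += 1
--         elif v == ".":
--             d += 1
--         else:
--             out += ["O"] * o + ["."] * d + [v]
--             o = d = 0
--     return out + ["O"] * o + ["."] * d
--
-- def _transpose(t):
--     # zip truncates at the shortest row, i.e. columns c < min(map(len, t), default=0)
--     return [list(col) for col in zip(*t)]
--
-- def _west(t):
--     return [_pack(row) for row in t]
--
-- def _east(t):
--     return [_pack(row[::-1])[::-1] for row in t]
--
-- def _north(t):
--     return _transpose([_pack(col) for col in _transpose(t)])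
--
-- def _south(t):
--     return _north(t[::-1])[::-1]
--
-- def _load(t):
--     h = len(t)
--     return sum((h - r) * row.count("O") for r, row in enumerate(t))
--
-- def part2(input):
--     t = [list(row) for row in input]
--     hist = [_load(t)]  # most recent first
--     m, i, c = hist[0], 0, 0
--     while True:
--         t = _east(_south(_west(_north(t))))
--         c += 1
--         beams = _load(t)
--         if beams < m:
--             m, i = beams, c
--         elif beams == m and c - i > 5:
--             p = c - i
--             if hist[:p] == hist[p : 2 * p]:
--                 return hist[p - 1 - (1000000000 - c) % p]
--             m, i = beams, c
--         hist.insert(0, beams)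
-- ===== Notes on version B (the rewrite author's own statement) =====
-- stated objective: alternative
-- what changed: Each tilt is re-done as whole-line run-length packing (split each row/column on wall cells and emit the run's O's then its dots), with north/south obtained via transpose and row reversal instead of A's per-rock while-loop scans, and the beam history kept most-recent-first so the period check and final lookup use plain prefix slices.
-- outside the precondition, e.g. on part2([['.', 'O'], ['.']]): A returns 1, B returns 0; on part2([['O'], ['.', 'O']]): A raises IndexError, B returns 1
import Mathlib
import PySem

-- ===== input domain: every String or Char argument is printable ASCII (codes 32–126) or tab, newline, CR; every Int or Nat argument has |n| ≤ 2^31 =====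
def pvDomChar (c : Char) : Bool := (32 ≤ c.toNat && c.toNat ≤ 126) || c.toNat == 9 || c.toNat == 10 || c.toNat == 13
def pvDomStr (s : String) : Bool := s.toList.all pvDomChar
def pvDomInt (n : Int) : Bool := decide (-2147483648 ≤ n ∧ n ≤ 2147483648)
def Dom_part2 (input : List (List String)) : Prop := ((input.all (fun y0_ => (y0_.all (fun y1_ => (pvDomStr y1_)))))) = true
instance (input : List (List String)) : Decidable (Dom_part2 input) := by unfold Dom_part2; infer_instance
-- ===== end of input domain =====

-- B re-implements the four tilts as whole-line run-length packing (split each line on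
-- wall cells, emit each run's 'O's then its '.'s), obtains north/south via transpose and
-- row reversal, and keeps the beam history most-recent-first; the cycle-detection
-- heuristic and the returned value are unchanged.  Both sides use the same fuel bound on
-- A's unbounded 'while True' (a totality guard only).  A mutates no caller-visible data
-- (it copies the input first); equivalence is about the return value.

-- ===== PORT A =====
-- 2-D cell read/write on a list-of-rows grid (defaults never read on the grids Pre_ admits)
def get2 (g : List (List String)) (r c : Nat) : String := (g.getD r []).getD c "."
def set2 (g : List (List String)) (r c : Nat) (v : String) : List (List String) :=
  g.set r ((g.getD r []).set c v)
-- the totality fuel for the 'while True' loop (both ports)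
def pvFuel : Nat := 1000000000

-- 'newR = r-1; while newR >= 0 and t[newR][c] == ".": newR -= 1; newR += 1' (returns final newR+1)
def scanUp (g : List (List String)) (c : Nat) : Nat → Nat
  | 0 => 0
  | k + 1 => if get2 g k c = "." then scanUp g c k else k + 1

-- 'newR = r+1; while newR < h and t[newR][c] == ".": newR += 1; newR -= 1' (returns final newR-1)
def scanDown (g : List (List String)) (h c k : Nat) : Nat :=
  if k < h then (if get2 g k c = "." then scanDown g h c (k + 1) else k - 1) else k - 1
  termination_by h - k

-- west/east whiles are row-local: 't[r][newC]' reads only row r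
def scanLeft (row : List String) : Nat → Nat
  | 0 => 0
  | k + 1 => if row.getD k "." = "." then scanLeft row k else k + 1

def scanRight (row : List String) (n k : Nat) : Nat :=
  if k < n then (if row.getD k "." = "." then scanRight row n (k + 1) else k - 1) else k - 1
  termination_by n - k

def slideNorthA (g : List (List String)) : List (List String) :=
  (List.range g.length).foldl (fun g1 r =>
    (List.range ((g1.getD r []).length)).foldl (fun g2 c =>
      if get2 g2 r c = "O" then set2 (set2 g2 r c ".") (scanUp g2 c r) c "O" else g2) g1) g

def slideWestA (g : List (List String)) : List (List String) :=
  (List.range g.length).foldl (fun g1 r =>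
    (List.range ((g1.getD r []).length)).foldl (fun g2 c =>
      if get2 g2 r c = "O" then set2 (set2 g2 r c ".") r (scanLeft (g2.getD r []) c) "O" else g2) g1) g

def slideSouthA (g : List (List String)) : List (List String) :=
  ((List.range g.length).reverse).foldl (fun g1 r =>
    (List.range ((g1.getD r []).length)).foldl (fun g2 c =>
      if get2 g2 r c = "O" then set2 (set2 g2 r c ".") (scanDown g2 g2.length c (r + 1)) c "O" else g2) g1) g

def slideEastA (g : List (List String)) : List (List String) :=
  (List.range g.length).foldl (fun g1 r =>
    ((List.range ((g1.getD r []).length)).reverse).foldl (fun g2 c =>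
      if get2 g2 r c = "O" then set2 (set2 g2 r c ".") r (scanRight (g2.getD r []) (g2.getD r []).length (c + 1)) "O" else g2) g1) g

def calcA (t : List (List String)) : Int :=
  (List.range t.length).foldl (fun res r =>
    res + (((t.getD r []).count "O" : Nat) : Int) * ((t.length : Int) - (r : Int))) 0

def checkPeriodA (beams : List Int) (p : Int) : Bool :=
  PySem.List.slice beams (some (-p)) none == PySem.List.slice beams (some (-2 * p)) (some (-p))

def loopA (t : List (List String)) (sb : List Int) (m i c : Int) : Nat → Int
  | 0 => 0
  | fuel + 1 =>
    let t1 := slideNorthA t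
    let t2 := slideWestA t1
    let t3 := slideSouthA t2
    let t4 := slideEastA t3
    let c' := c + 1
    let beams := calcA t4
    if beams < m then loopA t4 (sb ++ [beams]) beams c' c' fuel
    else if beams = m ∧ c' - i > 5 then
      let period := c' - i
      if checkPeriodA sb period then
        -- supportBeams[-period:][(1000000000 - c) % period]: the index is in range at the break
        PySem.List.pyGetD (PySem.List.slice sb (some (-period)) none) (PySem.Int.mod (1000000000 - c') period) 0
      else loopA t4 (sb ++ [beams]) beams c' c' fuel
    else loopA t4 (sb ++ [beams]) m i c' fuel

def part2 (input : List (List String)) : Int :=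
  -- the element-by-element copy of 'input' into 't' is the identity on immutable lists
  let sb : List Int := [calcA input]
  let m := sb.getD 0 0
  loopA input sb m 0 0 pvFuel

-- ===== PORT B =====
-- _pack: one pass over a line, state = (emitted prefix, O's and .'s of the open run)
def packStep (st : List String × Nat × Nat) (v : String) : List String × Nat × Nat :=
  if v = "O" then (st.1, st.2.1 + 1, st.2.2)
  else if v = "." then (st.1, st.2.1, st.2.2 + 1)
  else (st.1 ++ List.replicate st.2.1 "O" ++ List.replicate st.2.2 "." ++ [v], 0, 0)

def packB (cells : List String) : List String :=
  let st := cells.foldl packStep ([], 0, 0)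
  st.1 ++ List.replicate st.2.1 "O" ++ List.replicate st.2.2 "."

-- min(map(len, t), default=0)
def minLenB (t : List (List String)) : Nat :=
  match t.map List.length with
  | [] => 0
  | x :: xs => xs.foldl min x

-- [[row[c] for row in t] for c in range(...)]; c is below every row length, so the
-- getD default is never read
def transposeB (t : List (List String)) : List (List String) :=
  (List.range (minLenB t)).map (fun c => t.map (fun row => row.getD c "."))

def westB (t : List (List String)) : List (List String) := t.map packB

def eastB (t : List (List String)) : List (List String) :=
  t.map (fun row => (packB row.reverse).reverse)

def northB (t : List (List String)) : List (List String) :=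
  transposeB ((transposeB t).map packB)

def southB (t : List (List String)) : List (List String) :=
  (northB t.reverse).reverse

def loadB (t : List (List String)) : Int :=
  ((PySem.List.enumerate t 0).map (fun p =>
    ((t.length : Int) - p.1) * ((p.2.count "O" : Nat) : Int))).sum

def loopB (t : List (List String)) (hist : List Int) (m i c : Int) : Nat → Int
  | 0 => 0
  | fuel + 1 =>
    let t4 := eastB (southB (westB (northB t)))
    let c' := c + 1
    let beams := loadB t4
    if beams < m then loopB t4 (beams :: hist) beams c' c' fuel
    else if beams = m ∧ c' - i > 5 then
      let p := c' - i
      if PySem.List.slice hist none (some p) == PySem.List.slice hist (some p) (some (2 * p)) then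
        -- hist[p - 1 - (1000000000 - c) % p]: the index is in range at the break
        PySem.List.pyGetD hist (p - 1 - PySem.Int.mod (1000000000 - c') p) 0
      else loopB t4 (beams :: hist) beams c' c' fuel
    else loopB t4 (beams :: hist) m i c' fuel

def part2_alt (input : List (List String)) : Int :=
  -- [list(row) for row in input] is the identity on immutable lists
  let hist : List Int := [loadB input]
  loopB input hist (hist.getD 0 0) 0 0 pvFuel

-- ===== PRECONDITION & SPEC =====
-- Pre_ excludes non-rectangular grids that contain an "O": there A's slides index shorter
-- rows out of range and may raise IndexError (grids with no "O" never index at all).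
def Pre_part2 (input : List (List String)) : Prop :=
  (∀ row ∈ input, row.length = (input.headD []).length) ∨ (∀ row ∈ input, ∀ v ∈ row, v ≠ "O")
instance (input : List (List String)) : Decidable (Pre_part2 input) := by
  unfold Pre_part2; infer_instance

def pvWitness_part2 : List (List String) := [["O", ".", "#"], [".", "O", "."], ["#", ".", "O"]]

def Spec_part2 (input : List (List String)) (out : Int) : Prop := out = part2_alt input
instance (input : List (List String)) (out : Int) : Decidable (Spec_part2 input out) := by
  unfold Spec_part2; infer_instance

-- ===== CLAIM (what is proved, stated in full; the proofs are below) =====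
def Claim_equal_part2 : Prop :=
  ∀ (input : List (List String)), Dom_part2 input → Pre_part2 input → Spec_part2 input (part2 input)

-- ===== LEMMAS AND PROOFS =====
-- ---- basic list/grid lemmas ----
def RectW (w : Nat) (g : List (List String)) : Prop := ∀ row ∈ g, row.length = w
def NoO (g : List (List String)) : Prop := ∀ row ∈ g, ∀ v ∈ row, v ≠ "O"

theorem getD_set_self {α : Type} (l : List α) (c : Nat) (v d : α) (h : c < l.length) :
    (l.set c v).getD c d = v := by
  simp [List.getD_eq_getElem?_getD, List.getElem?_set_self h]

theorem getD_set_ne {α : Type} (l : List α) (c c' : Nat) (v d : α) (h : c ≠ c') :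
    (l.set c v).getD c' d = l.getD c' d := by
  simp [List.getD_eq_getElem?_getD, List.getElem?_set_ne h]

theorem set_getD_self {α : Type} (l : List α) (c : Nat) (d : α) : l.set c (l.getD c d) = l := by
  by_cases h : c < l.length
  · rw [List.getD_eq_getElem l d h]; exact List.set_getElem_self h
  · exact List.set_eq_of_length_le (by omega)

theorem length_set2 (g : List (List String)) (r c : Nat) (v : String) :
    (set2 g r c v).length = g.length := by simp [set2]

theorem row_set2_self (g : List (List String)) (r c : Nat) (v : String) (h : r < g.length) :
    (set2 g r c v).getD r [] = (g.getD r []).set c v := by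
  simp [set2, List.getD_eq_getElem?_getD, List.getElem?_set_self h]

theorem row_set2_ne (g : List (List String)) (r r' c : Nat) (v : String) (h : r ≠ r') :
    (set2 g r c v).getD r' [] = g.getD r' [] := by
  simp [set2, List.getD_eq_getElem?_getD, List.getElem?_set_ne h]

theorem get2_set2_self (g : List (List String)) (r c : Nat) (v : String)
    (hr : r < g.length) (hc : c < (g.getD r []).length) :
    get2 (set2 g r c v) r c = v := by
  rw [get2, row_set2_self g r c v hr, getD_set_self _ _ _ _ hc]

theorem get2_set2_ne (g : List (List String)) (r c r' c' : Nat) (v : String)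
    (h : r ≠ r' ∨ c ≠ c') : get2 (set2 g r c v) r' c' = get2 g r' c' := by
  rcases h with h | h
  · rw [get2, row_set2_ne g r r' c v h, get2]
  · by_cases hr : r = r'
    · subst hr
      by_cases hlen : r < g.length
      · rw [get2, row_set2_self g r c v hlen, getD_set_ne _ _ _ _ _ h, get2]
      · rw [get2, get2, set2, List.set_eq_of_length_le (by omega)]
    · rw [get2, row_set2_ne g r r' c v hr, get2]

theorem rect_set2 (w : Nat) (g : List (List String)) (r c : Nat) (v : String)
    (h : RectW w g) : RectW w (set2 g r c v) := by
  intro row hrow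
  by_cases hr : r < g.length
  · rcases List.mem_or_eq_of_mem_set hrow with h1 | h1
    · exact h row h1
    · subst h1
      rw [List.length_set]
      exact h _ (List.getD_eq_getElem g [] hr ▸ List.getElem_mem hr)
  · rw [set2, List.set_eq_of_length_le (by omega)] at hrow
    exact h row hrow

theorem row_mem (g : List (List String)) (r : Nat) (hr : r < g.length) : g.getD r [] ∈ g :=
  List.getD_eq_getElem g [] hr ▸ List.getElem_mem hr

theorem rect_row_len (w : Nat) (g : List (List String)) (r : Nat) (hR : RectW w g)
    (hr : r < g.length) : (g.getD r []).length = w := hR _ (row_mem g r hr)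

-- ---- named step functions (definitionally the ports' inner lambdas) ----
def stepNA (r : Nat) (g2 : List (List String)) (c : Nat) : List (List String) :=
  if get2 g2 r c = "O" then set2 (set2 g2 r c ".") (scanUp g2 c r) c "O" else g2

def stepSA (r : Nat) (g2 : List (List String)) (c : Nat) : List (List String) :=
  if get2 g2 r c = "O" then set2 (set2 g2 r c ".") (scanDown g2 g2.length c (r + 1)) c "O" else g2

def rstepWA (row : List String) (c : Nat) : List String :=
  if row.getD c "." = "O" then (row.set c ".").set (scanLeft row c) "O" else row

def rstepEA (row : List String) (c : Nat) : List String :=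
  if row.getD c "." = "O" then (row.set c ".").set (scanRight row row.length (c + 1)) "O" else row

theorem slideNorthA_eq (g : List (List String)) :
    slideNorthA g = (List.range g.length).foldl (fun g1 r =>
      (List.range ((g1.getD r []).length)).foldl (stepNA r) g1) g := rfl

theorem slideSouthA_eq (g : List (List String)) :
    slideSouthA g = ((List.range g.length).reverse).foldl (fun g1 r =>
      (List.range ((g1.getD r []).length)).foldl (stepSA r) g1) g := rfl

-- ---- scan characterizations (A's inner while loops) ----
def CInvN (g : List (List String)) (fv : Int) (b c : Nat) : Prop :=
  0 ≤ fv ∧ fv.toNat ≤ b ∧ (∀ j, fv.toNat ≤ j → j < b → get2 g j c = ".") ∧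
    (fv.toNat = 0 ∨ get2 g (fv.toNat - 1) c ≠ ".")

def RInvW (row : List String) (fv : Int) (b : Nat) : Prop :=
  0 ≤ fv ∧ fv.toNat ≤ b ∧ (∀ j, fv.toNat ≤ j → j < b → row.getD j "." = ".") ∧
    (fv.toNat = 0 ∨ row.getD (fv.toNat - 1) "." ≠ ".")

theorem scanUp_eq (g : List (List String)) (c : Nat) (fv : Int) :
    ∀ r, CInvN g fv r c → scanUp g c r = fv.toNat := by
  intro r
  induction r with
  | zero => rintro ⟨h0, h1, _, _⟩; simp [scanUp]; omega
  | succ r ih =>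
    rintro ⟨h0, h1, h2, h3⟩
    by_cases he : fv.toNat = r + 1
    · have hne : get2 g r c ≠ "." := by
        rcases h3 with h3 | h3
        · omega
        · simpa [he] using h3
      simp only [scanUp]
      rw [if_neg hne]
      omega
    · have hlt : fv.toNat ≤ r := by omega
      have hdot : get2 g r c = "." := h2 r hlt (by omega)
      rw [scanUp, if_pos hdot]
      exact ih ⟨h0, hlt, fun j hj hj' => h2 j hj (by omega), h3⟩

theorem scanLeft_eq (row : List String) (fv : Int) :
    ∀ c, RInvW row fv c → scanLeft row c = fv.toNat := by
  intro c
  induction c with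
  | zero => rintro ⟨h0, h1, _, _⟩; simp [scanLeft]; omega
  | succ r ih =>
    rintro ⟨h0, h1, h2, h3⟩
    by_cases he : fv.toNat = r + 1
    · have hne : row.getD r "." ≠ "." := by
        rcases h3 with h3 | h3
        · omega
        · simpa [he] using h3
      simp only [scanLeft]
      rw [if_neg hne]
      omega
    · have hlt : fv.toNat ≤ r := by omega
      have hdot : row.getD r "." = "." := h2 r hlt (by omega)
      rw [scanLeft, if_pos hdot]
      exact ih ⟨h0, hlt, fun j hj hj' => h2 j hj (by omega), h3⟩

-- ---- west/east slides: the grid step only touches row r ----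
theorem stepWA_row (r : Nat) (g : List (List String)) (c : Nat) (hr : r < g.length) :
    (if get2 g r c = "O" then set2 (set2 g r c ".") r (scanLeft (g.getD r []) c) "O" else g)
      = g.set r (rstepWA (g.getD r []) c) := by
  rw [rstepWA]
  by_cases hv : (g.getD r []).getD c "." = "O"
  · rw [if_pos (show get2 g r c = "O" from hv), if_pos hv, set2, row_set2_self g r c "." hr, set2,
      List.set_set]
  · rw [if_neg (show ¬ get2 g r c = "O" from hv), if_neg hv, set_getD_self]

theorem stepEA_row (r : Nat) (g : List (List String)) (c : Nat) (hr : r < g.length) :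
    (if get2 g r c = "O" then
        set2 (set2 g r c ".") r (scanRight (g.getD r []) (g.getD r []).length (c + 1)) "O" else g)
      = g.set r (rstepEA (g.getD r []) c) := by
  rw [rstepEA]
  by_cases hv : (g.getD r []).getD c "." = "O"
  · rw [if_pos (show get2 g r c = "O" from hv), if_pos hv, set2, row_set2_self g r c "." hr, set2,
      List.set_set]
  · rw [if_neg (show ¬ get2 g r c = "O" from hv), if_neg hv, set_getD_self]

theorem fold_row_bridge (r : Nat) (stepG : List (List String) → Nat → List (List String))
    (stepR : List String → Nat → List String)
    (h : ∀ g c, r < g.length → stepG g c = g.set r (stepR (g.getD r []) c)) :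
    ∀ (cs : List Nat) (g : List (List String)), r < g.length →
      cs.foldl stepG g = g.set r (cs.foldl stepR (g.getD r [])) := by
  intro cs
  induction cs with
  | nil => intro g hr; exact (set_getD_self g r []).symm
  | cons c cs ih =>
    intro g hr
    rw [List.foldl_cons, List.foldl_cons, h g c hr,
      ih _ (by rw [List.length_set]; exact hr),
      getD_set_self _ _ _ _ hr, List.set_set]

theorem foldl_congr_inv {α β : Type} (P : α → Prop) (f g : α → β → α) :
    ∀ (l : List β) (a : α), P a → (∀ a x, P a → x ∈ l → f a x = g a x ∧ P (f a x)) →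
      l.foldl f a = l.foldl g a := by
  intro l
  induction l with
  | nil => intro a _ _; rfl
  | cons x xs ih =>
    intro a hP h
    rw [List.foldl_cons, List.foldl_cons, (h a x hP (by simp)).1]
    exact ih _ ((h a x hP (by simp)).1 ▸ (h a x hP (by simp)).2)
      (fun a y hPa hy => h a y hPa (by simp [hy]))

theorem slideWestA_rows (g : List (List String)) :
    slideWestA g = (List.range g.length).foldl (fun g1 r =>
      g1.set r ((List.range ((g1.getD r []).length)).foldl rstepWA (g1.getD r []))) g := by
  rw [slideWestA]
  apply foldl_congr_inv (fun g1 => g1.length = g.length)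
  · rfl
  · intro g1 r hP hr
    have hrlt : r < g1.length := by rw [hP]; exact List.mem_range.mp hr
    constructor
    · exact fold_row_bridge r _ rstepWA (fun g2 c h => stepWA_row r g2 c h) _ g1 hrlt
    · rw [fold_row_bridge r _ rstepWA (fun g2 c h => stepWA_row r g2 c h) _ g1 hrlt,
        List.length_set, hP]

theorem slideEastA_rows (g : List (List String)) :
    slideEastA g = (List.range g.length).foldl (fun g1 r =>
      g1.set r (((List.range ((g1.getD r []).length)).reverse).foldl rstepEA (g1.getD r []))) g := by
  rw [slideEastA]
  apply foldl_congr_inv (fun g1 => g1.length = g.length)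
  · rfl
  · intro g1 r hP hr
    have hrlt : r < g1.length := by rw [hP]; exact List.mem_range.mp hr
    constructor
    · exact fold_row_bridge r _ rstepEA (fun g2 c h => stepEA_row r g2 c h) _ g1 hrlt
    · rw [fold_row_bridge r _ rstepEA (fun g2 c h => stepEA_row r g2 c h) _ g1 hrlt,
        List.length_set, hP]

-- a fold that rewrites each row in place is a map
theorem fold_set_shift (f : List String → List String) :
    ∀ (l : List Nat) (y : List String) (ys : List (List String)),
      (l.map Nat.succ).foldl (fun g1 r => g1.set r (f (g1.getD r []))) (y :: ys)
        = y :: l.foldl (fun g1 r => g1.set r (f (g1.getD r []))) ys := by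
  intro l
  induction l with
  | nil => intro y ys; rfl
  | cons r rs ih =>
    intro y ys
    rw [List.map_cons, List.foldl_cons, List.foldl_cons]
    have h1 : (y :: ys).getD (r + 1) [] = ys.getD r [] := by simp
    have h2 : (y :: ys).set (r + 1) (f (ys.getD r [])) = y :: ys.set r (f (ys.getD r [])) := by simp
    rw [h1, h2, ih]

theorem fold_set_map (f : List String → List String) :
    ∀ (g : List (List String)),
      (List.range g.length).foldl (fun g1 r => g1.set r (f (g1.getD r []))) g = g.map f := by
  intro g
  induction g with
  | nil => rfl
  | cons x xs ih =>
    rw [List.length_cons, List.range_succ_eq_map, List.foldl_cons]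
    have h0 : (x :: xs).set 0 (f ((x :: xs).getD 0 [])) = f x :: xs := by simp
    rw [h0, fold_set_shift, ih, List.map_cons]

-- ---- pack machinery ----
def pst (l : List String) : List String × Nat × Nat := l.foldl packStep ([], 0, 0)

def render (st : List String × Nat × Nat) : List String :=
  st.1 ++ List.replicate st.2.1 "O" ++ List.replicate st.2.2 "."

def pm (st : List String × Nat × Nat) : Nat := st.1.length + st.2.1 + st.2.2

def AccOK (st : List String × Nat × Nat) : Prop := st.1.getLastD "#" ≠ "."

theorem packB_render (l : List String) : packB l = render (pst l) := rfl

theorem render_length (st : List String × Nat × Nat) : (render st).length = pm st := by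
  simp [render, pm]; omega

theorem pm_step (st : List String × Nat × Nat) (v : String) : pm (packStep st v) = pm st + 1 := by
  rw [packStep]
  split_ifs <;> simp [pm] <;> omega

theorem pm_foldl : ∀ (l : List String) (st : List String × Nat × Nat),
    pm (l.foldl packStep st) = pm st + l.length := by
  intro l
  induction l with
  | nil => intro st; simp
  | cons v vs ih => intro st; rw [List.foldl_cons, ih, pm_step]; simp; omega

theorem pst_length (l : List String) : pm (pst l) = l.length := by
  rw [pst, pm_foldl]; simp [pm]

theorem accOK_step (st : List String × Nat × Nat) (v : String) (h : AccOK st) :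
    AccOK (packStep st v) := by
  rw [packStep]
  split_ifs with h1 h2
  · exact h
  · exact h
  · simp [AccOK]
    exact h2

theorem accOK_foldl : ∀ (l : List String) (st : List String × Nat × Nat),
    AccOK st → AccOK (l.foldl packStep st) := by
  intro l
  induction l with
  | nil => intro st h; exact h
  | cons v vs ih => intro st h; exact ih _ (accOK_step st v h)

theorem accOK_pst (l : List String) : AccOK (pst l) := by
  apply accOK_foldl
  simp [AccOK]

theorem pst_append (l : List String) (v : String) : pst (l ++ [v]) = packStep (pst l) v := by
  simp [pst]

theorem getD_replicate_self (n k : Nat) (a : String) : (List.replicate n a).getD k a = a := by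
  by_cases h : k < n
  · rw [List.getD_eq_getElem _ _ (by simpa using h), List.getElem_replicate]
  · rw [List.getD_eq_default _ _ (by simpa using h)]

theorem render_getD_acc (st : List String × Nat × Nat) (j : Nat) (h : j < st.1.length) :
    (render st).getD j "." = st.1.getD j "." := by
  rw [render, List.append_assoc, List.getD_append _ _ _ _ h]

theorem render_getD_O (st : List String × Nat × Nat) (j : Nat) (h1 : st.1.length ≤ j)
    (h2 : j < st.1.length + st.2.1) : (render st).getD j "." = "O" := by
  rw [render, List.append_assoc, List.getD_append_right _ _ _ _ h1,
    List.getD_append _ _ _ _ (by simp; omega),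
    List.getD_eq_getElem _ _ (by simp; omega), List.getElem_replicate]

theorem render_getD_dot (st : List String × Nat × Nat) (j : Nat)
    (h1 : st.1.length + st.2.1 ≤ j) : (render st).getD j "." = "." := by
  rw [render, List.append_assoc, List.getD_append_right _ _ _ _ (by omega),
    List.getD_append_right _ _ _ _ (by simp; omega)]
  exact getD_replicate_self _ _ _

theorem getD_last (l : List String) (h : l ≠ []) : l.getD (l.length - 1) "." = l.getLastD "#" := by
  rcases List.exists_cons_of_ne_nil h with ⟨a, t, rfl⟩
  rw [List.getLastD_eq_getLast?, List.getLast?_eq_getElem?]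
  rw [List.getD_eq_getElem _ _ (by simp)]
  simp
  rfl

theorem render_RInvW (st : List String × Nat × Nat) (rest : List String) (hA : AccOK st) :
    RInvW (render st ++ rest) ((st.1.length + st.2.1 : Nat) : Int) (pm st) := by
  have hpm : pm st = st.1.length + st.2.1 + st.2.2 := rfl
  have hlen : (render st).length = pm st := render_length st
  refine ⟨by positivity, by rw [Int.toNat_natCast]; omega, ?_, ?_⟩
  · intro j hj hj'
    rw [Int.toNat_natCast] at hj
    rw [List.getD_append _ _ _ _ (by omega)]
    exact render_getD_dot st j hj
  · rcases Nat.eq_zero_or_pos (st.1.length + st.2.1) with h0 | h0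
    · left; simp [h0]
    · right
      rw [Int.toNat_natCast, List.getD_append _ _ _ _ (by omega)]
      by_cases ho : 0 < st.2.1
      · rw [render_getD_O st _ (by omega) (by omega)]
        simp
      · have hacc : 0 < st.1.length := by omega
        rw [render_getD_acc st _ (by omega)]
        have : st.1.length + st.2.1 - 1 = st.1.length - 1 := by omega
        rw [this, getD_last st.1 (by intro hc; simp [hc] at hacc)]
        exact hA

-- list surgery used by the slide steps
theorem set_append_len {α : Type} : ∀ (l t : List α) (b : α),
    (l ++ t).set l.length b = l ++ t.set 0 b := by
  intro l
  induction l with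
  | nil => intro t b; simp
  | cons x xs ih => intro t b; simp [ih]

theorem set_append_cons {α : Type} (l t : List α) (a b : α) (k : Nat) (h : l.length = k) :
    (l ++ a :: t).set k b = l ++ b :: t := by
  subst h
  rw [set_append_len]
  rfl

theorem render_step_dot (st : List String × Nat × Nat) :
    render (packStep st ".") = render st ++ ["."] := by
  rw [packStep, if_neg (by simp), if_pos rfl]
  simp [render, List.replicate_succ']

theorem render_step_wall (st : List String × Nat × Nat) (v : String) (h1 : v ≠ "O")
    (h2 : v ≠ ".") : render (packStep st v) = render st ++ [v] := by
  rw [packStep, if_neg h1, if_neg h2]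
  simp [render]

theorem render_step_O_set (st : List String × Nat × Nat) (rest : List String) :
    ((render st ++ "." :: rest).set (st.1.length + st.2.1) "O")
      = render (packStep st "O") ++ rest := by
  have hO : render (packStep st "O") =
      st.1 ++ List.replicate (st.2.1 + 1) "O" ++ List.replicate st.2.2 "." := by
    rw [packStep, if_pos rfl]; rfl
  rcases hd : st.2.2 with _ | d
  · have : render st ++ "." :: rest = (st.1 ++ List.replicate st.2.1 "O") ++ "." :: rest := by
      simp [render, hd]
    rw [this, show st.1.length + st.2.1 = (st.1 ++ List.replicate st.2.1 "O").length by simp,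
      set_append_len]
    simp [hO, hd, List.replicate_succ']
  · have : render st ++ "." :: rest
        = (st.1 ++ List.replicate st.2.1 "O") ++ ("." :: (List.replicate d "." ++ "." :: rest)) := by
      simp [render, hd, List.replicate_succ, List.append_assoc]
    rw [this, show st.1.length + st.2.1 = (st.1 ++ List.replicate st.2.1 "O").length by simp,
      set_append_len]
    simp [hO, hd, List.replicate_succ', List.append_assoc]

-- ---- west: A's row loop computes the packed row ----
theorem westP (row : List String) : ∀ k, k ≤ row.length →
    (List.range k).foldl rstepWA row = render (pst (row.take k)) ++ row.drop k := by
  intro k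
  induction k with
  | zero => intro _; simp [pst, render]
  | succ k ih =>
    intro hk
    have hkn : k < row.length := by omega
    rw [List.range_succ, List.foldl_append, List.foldl_cons, List.foldl_nil, ih (by omega)]
    set st := pst (row.take k) with hst
    have hm : pm st = k := by
      rw [hst, pst_length, List.length_take]; omega
    have hrl : (render st).length = k := by rw [render_length, hm]
    have hdrop : row.drop k = row[k] :: row.drop (k + 1) := List.drop_eq_getElem_cons hkn
    have htake : row.take (k + 1) = row.take k ++ [row[k]] := by
      rw [List.take_add_one, List.getElem?_eq_getElem hkn]; rfl
    have hget : (render st ++ row.drop k).getD k "." = row[k] := by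
      rw [List.getD_append_right _ _ _ _ (by omega), hrl, Nat.sub_self, hdrop]
      rfl
    rw [htake, pst_append, ← hst]
    by_cases hO : row[k] = "O"
    · rw [rstepWA, hget, if_pos hO]
      have hscan : scanLeft (render st ++ row.drop k) k = st.1.length + st.2.1 := by
        have := scanLeft_eq (render st ++ row.drop k) ((st.1.length + st.2.1 : Nat) : Int) k
          (by rw [← hm]; exact render_RInvW st _ (accOK_pst _))
        simpa using this
      have hsetk : (render st ++ row.drop k).set k "." = render st ++ "." :: row.drop (k + 1) := by
        rw [hdrop]
        exact set_append_cons _ _ _ _ _ hrl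
      rw [hscan, hsetk, hO, render_step_O_set]
    · by_cases hD : row[k] = "."
      · rw [rstepWA, hget, if_neg (by rw [hD]; simp), hD, render_step_dot]
        rw [hdrop, hD]
        simp
      · rw [rstepWA, hget, if_neg hO, render_step_wall _ _ hO hD]
        rw [hdrop]
        simp

theorem rowWest_pack (row : List String) :
    (List.range row.length).foldl rstepWA row = packB row := by
  rw [westP row row.length le_rfl, List.take_length, List.drop_length, packB_render]
  simp

theorem packB_length (l : List String) : (packB l).length = l.length := by
  rw [packB_render, render_length, pst_length]

theorem slideWestA_B (g : List (List String)) : slideWestA g = westB g := by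
  rw [slideWestA_rows, westB, ← fold_set_map packB g]
  simp only [rowWest_pack]

-- ---- east is west on the reversed row ----
theorem getD_reverse {α : Type} (l : List α) (j : Nat) (d : α) (h : j < l.length) :
    l.reverse.getD j d = l.getD (l.length - 1 - j) d := by
  rw [List.getD_eq_getElem _ _ (by simpa using h), List.getElem_reverse,
    List.getD_eq_getElem _ _ (by omega)]

theorem reverse_set {α : Type} (l : List α) (i : Nat) (x : α) (h : i < l.length) :
    (l.set i x).reverse = l.reverse.set (l.length - 1 - i) x := by
  apply List.ext_getElem
  · simp
  · intro j h1 h2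
    simp only [List.length_reverse, List.length_set] at h1 h2
    rw [List.getElem_reverse, List.getElem_set, List.getElem_set, List.getElem_reverse]
    simp only [List.length_set]
    by_cases hij : i = l.length - 1 - j
    · rw [if_pos hij, if_pos (by omega)]
    · rw [if_neg hij, if_neg (by omega)]

theorem scanLeft_le (row : List String) : ∀ k, scanLeft row k ≤ k := by
  intro k
  induction k with
  | zero => simp [scanLeft]
  | succ k ih => rw [scanLeft]; split_ifs; · omega
                 · omega

theorem scanRight_rev (row : List String) : ∀ j, j ≤ row.length →
    scanRight row row.length (row.length - j) = row.length - 1 - scanLeft row.reverse j := by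
  intro j
  induction j with
  | zero =>
    intro _
    rw [Nat.sub_zero, scanRight, if_neg (by omega)]
    rfl
  | succ j ih =>
    intro hj
    have hlt : row.length - (j + 1) < row.length := by omega
    have hcell : row.reverse.getD j "." = row.getD (row.length - 1 - j) "." :=
      getD_reverse row j "." (by omega)
    have hidx : row.length - (j + 1) = row.length - 1 - j := by omega
    rw [scanRight, if_pos hlt, hidx]
    rw [scanLeft, hcell]
    by_cases hdot : row.getD (row.length - 1 - j) "." = "."
    · rw [if_pos hdot, if_pos hdot]
      have : row.length - 1 - j + 1 = row.length - j := by omega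
      rw [this, ih (by omega)]
    · rw [if_neg hdot, if_neg hdot]
      omega

theorem rstepWA_length (row : List String) (c : Nat) : (rstepWA row c).length = row.length := by
  rw [rstepWA]; split_ifs <;> simp

theorem rstepEA_rev (row : List String) (c : Nat) (hc : c < row.length) :
    rstepEA row c = (rstepWA row.reverse (row.length - 1 - c)).reverse := by
  have hget : row.reverse.getD (row.length - 1 - c) "." = row.getD c "." := by
    rw [getD_reverse row _ "." (by omega)]
    congr 1
    omega
  rw [rstepEA, rstepWA, hget]
  by_cases hO : row.getD c "." = "O"
  · rw [if_pos hO, if_pos hO]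
    have hscan : scanRight row row.length (c + 1)
        = row.length - 1 - scanLeft row.reverse (row.length - 1 - c) := by
      have := scanRight_rev row (row.length - 1 - c) (by omega)
      rwa [show row.length - (row.length - 1 - c) = c + 1 by omega] at this
    set σ := scanLeft row.reverse (row.length - 1 - c) with hσ
    have hσle : σ ≤ row.length - 1 := le_trans (scanLeft_le _ _) (by omega)
    rw [hscan, ← reverse_set row c "." hc,
      ← show ((row.set c ".").set (row.length - 1 - σ) "O").reverse
          = ((row.set c ".").reverse).set σ "O" by
        rw [reverse_set _ _ _ (by simp; omega)]
        congr 1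
        simp
        omega]
    rw [List.reverse_reverse]
  · rw [if_neg hO, if_neg hO, List.reverse_reverse]

theorem east_fold_rev (n : Nat) : ∀ (cs : List Nat), (∀ c ∈ cs, c < n) →
    ∀ (row : List String), row.length = n →
    cs.foldl rstepEA row = ((cs.map (fun c => n - 1 - c)).foldl rstepWA row.reverse).reverse := by
  intro cs
  induction cs with
  | nil => intro _ row _; simp
  | cons c cs ih =>
    intro hmem row hlen
    rw [List.map_cons, List.foldl_cons, List.foldl_cons]
    have hc : c < row.length := by rw [hlen]; exact hmem c (by simp)
    rw [rstepEA_rev row c hc, hlen,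
      ih (fun x hx => hmem x (by simp [hx])) _ (by rw [List.length_reverse, rstepWA_length, List.length_reverse, hlen]),
      List.reverse_reverse]

theorem map_rho_range (n : Nat) :
    (List.range n).map (fun c => n - 1 - c) = (List.range n).reverse := by
  apply List.ext_getElem
  · simp
  · intro i h1 h2
    simp only [List.length_map, List.length_range] at h1
    simp [List.getElem_reverse]

theorem rowEast_pack (row : List String) :
    ((List.range row.length).reverse).foldl rstepEA row = (packB row.reverse).reverse := by
  rw [east_fold_rev row.length _ (by intro c hc; rw [List.mem_reverse, List.mem_range] at hc; exact hc) row rfl]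
  rw [List.map_reverse, map_rho_range, List.reverse_reverse]
  have := rowWest_pack row.reverse
  rw [List.length_reverse] at this
  rw [this]

theorem slideEastA_B (g : List (List String)) : slideEastA g = eastB g := by
  rw [slideEastA_rows, eastB, ← fold_set_map (fun row => (packB row.reverse).reverse) g]
  simp only [rowEast_pack]

-- ---- north: A's row-major rock loop packs every column ----
def colPre (g : List (List String)) (c b : Nat) : List String :=
  (List.range b).map (fun j => get2 g j c)

theorem colPre_length (g : List (List String)) (c b : Nat) : (colPre g c b).length = b := by
  simp [colPre]

theorem colPre_succ (g : List (List String)) (c b : Nat) :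
    colPre g c (b + 1) = colPre g c b ++ [get2 g b c] := by
  simp [colPre, List.range_succ]

theorem colPre_getD (g : List (List String)) (c b j : Nat) (h : j < b) :
    (colPre g c b).getD j "." = get2 g j c := by
  rw [List.getD_eq_getElem _ _ (by simpa [colPre_length] using h)]
  simp [colPre]

theorem colPre_congr (g g' : List (List String)) (c b : Nat)
    (h : ∀ j, j < b → get2 g j c = get2 g' j c) : colPre g c b = colPre g' c b := by
  apply List.map_congr_left
  intro j hj
  exact h j (List.mem_range.mp hj)

def NI (g0 g : List (List String)) (b c : Nat) : Prop :=
  (∀ j, b ≤ j → get2 g j c = get2 g0 j c) ∧ colPre g c b = render (pst (colPre g0 c b))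

theorem northCell (w H : Nat) (g0 g : List (List String)) (r c : Nat)
    (hR : RectW w g) (hg : g.length = H) (hr : r < H) (hc : c < w)
    (hI : NI g0 g r c) :
    RectW w (stepNA r g c) ∧ (stepNA r g c).length = H ∧ NI g0 (stepNA r g c) (r + 1) c ∧
      (∀ c' b, c' ≠ c → NI g0 g b c' → NI g0 (stepNA r g c) b c') := by
  obtain ⟨hU, hP⟩ := hI
  set st := pst (colPre g0 c r) with hst
  have hpm : pm st = r := by rw [hst, pst_length, colPre_length]
  have hpm' : st.1.length + st.2.1 + st.2.2 = r := hpm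
  have hv : get2 g r c = get2 g0 r c := hU r le_rfl
  have hrg : r < g.length := by omega
  have hrow : (g.getD r []).length = w := rect_row_len w g r hR hrg
  by_cases hO : get2 g r c = "O"
  · set s := st.1.length + st.2.1 with hs
    have hsr : s ≤ r := by omega
    have hgdot : ∀ j, s ≤ j → j < r → get2 g j c = "." := by
      intro j hj hj'
      rw [← colPre_getD g c r j hj', hP]
      exact render_getD_dot st j hj
    have hlast : s = 0 ∨ get2 g (s - 1) c ≠ "." := by
      rcases Nat.eq_zero_or_pos s with h0 | h0
      · exact Or.inl h0
      · right
        rw [← colPre_getD g c r (s - 1) (by omega), hP]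
        by_cases ho : 0 < st.2.1
        · rw [render_getD_O st _ (by omega) (by omega)]
          simp
        · have hacc : 0 < st.1.length := by omega
          rw [render_getD_acc st _ (by omega),
            show s - 1 = st.1.length - 1 by omega,
            getD_last st.1 (by intro hcon; simp [hcon] at hacc)]
          exact accOK_pst _
    have hscan : scanUp g c r = s := by
      have := scanUp_eq g c (s : Int) r
        ⟨by positivity, by simp; omega, by
          intro j hj hj'
          exact hgdot j (by simpa using hj) hj', by
          rw [Int.toNat_natCast]
          exact hlast⟩
      simpa using this
    have hstep : stepNA r g c = set2 (set2 g r c ".") s c "O" := by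
      rw [stepNA, if_pos hO, hscan]
    have hR1 : RectW w (set2 g r c ".") := rect_set2 w g r c "." hR
    have hR2 : RectW w (set2 (set2 g r c ".") s c "O") := rect_set2 w _ _ _ _ hR1
    have hlen2 : (set2 (set2 g r c ".") s c "O").length = H := by
      rw [length_set2, length_set2, hg]
    have hget : ∀ j, get2 (set2 (set2 g r c ".") s c "O") j c =
        if j = s then "O" else if j = r then "." else get2 g j c := by
      intro j
      by_cases hj1 : j = s
      · subst hj1
        rw [if_pos rfl, get2_set2_self _ _ _ _ (by rw [length_set2]; omega)
            (by rw [rect_row_len w _ s hR1 (by rw [length_set2]; omega)]; omega)]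
      · rw [if_neg hj1, get2_set2_ne _ _ _ _ _ _ (Or.inl (Ne.symm hj1))]
        by_cases hj2 : j = r
        · subst hj2
          rw [if_pos rfl, get2_set2_self _ _ _ _ hrg (by rw [hrow]; omega)]
        · rw [if_neg hj2, get2_set2_ne _ _ _ _ _ _ (Or.inl (Ne.symm hj2))]
    have hgetne : ∀ j c', c' ≠ c →
        get2 (set2 (set2 g r c ".") s c "O") j c' = get2 g j c' := by
      intro j c' hne
      rw [get2_set2_ne _ _ _ _ _ _ (Or.inr (Ne.symm hne)),
        get2_set2_ne _ _ _ _ _ _ (Or.inr (Ne.symm hne))]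
    have hst' : packStep st "O" = (st.1, st.2.1 + 1, st.2.2) := by
      rw [packStep, if_pos rfl]
    rw [hstep]
    refine ⟨hR2, hlen2, ⟨?_, ?_⟩, ?_⟩
    · intro j hj
      rw [hget j, if_neg (by omega), if_neg (by omega)]
      exact hU j (by omega)
    · rw [colPre_succ g0, pst_append, ← hst, show get2 g0 r c = "O" from hv ▸ hO]
      apply List.ext_getElem
      · rw [colPre_length, render_length, pm_step, hpm]
      · intro j hj1 hj2
        rw [colPre_length] at hj1
        rw [← List.getD_eq_getElem _ "." , ← List.getD_eq_getElem _ "."]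
        rw [colPre_getD _ c (r + 1) j hj1, hget j]
        by_cases hj : j = s
        · rw [if_pos hj, hj]
          rw [render_getD_O _ _ (by rw [hst']; simp; omega) (by rw [hst']; simp; omega)]
        · rw [if_neg hj]
          by_cases hjr : j = r
          · rw [if_pos hjr, hjr,
              render_getD_dot _ _ (by rw [hst']; simp; omega)]
          · rw [if_neg hjr, ← colPre_getD g c r j (by omega), hP]
            by_cases hja : j < st.1.length
            · rw [render_getD_acc st _ hja, render_getD_acc _ _ (by rw [hst']; simpa using hja)]
              rw [hst']
            · by_cases hjo : j < s
              · rw [render_getD_O st _ (by omega) (by omega),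
                  render_getD_O _ _ (by rw [hst']; simp; omega) (by rw [hst']; simp; omega)]
              · rw [render_getD_dot st _ (by omega),
                  render_getD_dot _ _ (by rw [hst']; simp; omega)]
    · intro c' b hne hI'
      obtain ⟨k1, k2⟩ := hI'
      refine ⟨fun j hj => by rw [hgetne j c' hne]; exact k1 j hj, ?_⟩
      rw [colPre_congr _ g c' b (fun j _ => hgetne j c' hne)]
      exact k2
  · have hstep : stepNA r g c = g := by rw [stepNA, if_neg hO]
    rw [hstep]
    refine ⟨hR, hg, ⟨fun j hj => hU j (by omega), ?_⟩, fun c' b _ hI' => hI'⟩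
    rw [colPre_succ g0, pst_append, ← hst, colPre_succ, hP, hv]
    by_cases hD : get2 g0 r c = "."
    · rw [hD, render_step_dot]
    · rw [render_step_wall st _ (by rw [← hv]; exact hO) hD]

theorem northInner (w H r : Nat) (g0 g : List (List String))
    (hR : RectW w g) (hg : g.length = H) (hr : r < H)
    (hI : ∀ c', c' < w → NI g0 g r c') :
    ∀ n, n ≤ w →
      RectW w ((List.range n).foldl (stepNA r) g) ∧
      ((List.range n).foldl (stepNA r) g).length = H ∧
      (∀ c', c' < n → NI g0 ((List.range n).foldl (stepNA r) g) (r + 1) c') ∧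
      (∀ c', n ≤ c' → c' < w → NI g0 ((List.range n).foldl (stepNA r) g) r c') := by
  intro n
  induction n with
  | zero =>
    intro _
    exact ⟨hR, hg, fun c' h => by omega, fun c' _ h => hI c' h⟩
  | succ n ih =>
    intro hn
    obtain ⟨iR, iL, iLo, iHi⟩ := ih (by omega)
    rw [List.range_succ, List.foldl_append, List.foldl_cons, List.foldl_nil]
    set gn := (List.range n).foldl (stepNA r) g with hgn
    obtain ⟨eR, eL, eN, eO⟩ :=
      northCell w H g0 gn r n iR iL hr (by omega) (iHi n le_rfl (by omega))
    refine ⟨eR, eL, ?_, ?_⟩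
    · intro c' hc'
      by_cases hcc : c' = n
      · subst hcc; exact eN
      · exact eO c' (r + 1) hcc (iLo c' (by omega))
    · intro c' hc' hw'
      exact eO c' r (by omega) (iHi c' (by omega) hw')

theorem northOuter (w H : Nat) (g0 : List (List String))
    (hR : RectW w g0) (hg : g0.length = H) :
    ∀ n, n ≤ H →
      RectW w ((List.range n).foldl (fun g1 r =>
          (List.range ((g1.getD r []).length)).foldl (stepNA r) g1) g0) ∧
      ((List.range n).foldl (fun g1 r =>
          (List.range ((g1.getD r []).length)).foldl (stepNA r) g1) g0).length = H ∧
      (∀ c, c < w → NI g0 ((List.range n).foldl (fun g1 r =>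
          (List.range ((g1.getD r []).length)).foldl (stepNA r) g1) g0) n c) := by
  intro n
  induction n with
  | zero =>
    intro _
    refine ⟨hR, hg, fun c _ => ⟨fun j _ => rfl, ?_⟩⟩
    simp [colPre, pst, render]
  | succ n ih =>
    intro hn
    obtain ⟨iR, iL, iI⟩ := ih (by omega)
    rw [List.range_succ, List.foldl_append, List.foldl_cons, List.foldl_nil]
    set gm := (List.range n).foldl (fun g1 r =>
      (List.range ((g1.getD r []).length)).foldl (stepNA r) g1) g0 with hgm
    have hrow : (gm.getD n []).length = w := rect_row_len w gm n iR (by omega)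
    rw [hrow]
    obtain ⟨eR, eL, eLo, _⟩ :=
      northInner w H n g0 gm iR iL (by omega) (fun c hc => iI c hc) w le_rfl
    exact ⟨eR, eL, fun c hc => eLo c hc⟩

-- ---- transpose characterization on rectangular grids ----
theorem foldl_min_const : ∀ (l : List Nat) (w a : Nat), (∀ x ∈ l, x = w) → l ≠ [] →
    l.foldl min a = min a w := by
  intro l
  induction l with
  | nil => intro w a _ h; exact absurd rfl h
  | cons x xs ih =>
    intro w a hall hne
    rw [List.foldl_cons, hall x (by simp)]
    rcases xs with _ | ⟨y, ys⟩
    · rfl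
    · rw [ih w (min a w) (fun z hz => hall z (by simp [hz])) (by simp), min_assoc, min_self]

theorem minLenB_rect (w : Nat) (g : List (List String)) (hw : RectW w g) (hne : g ≠ []) :
    minLenB g = w := by
  rcases g with _ | ⟨r0, rs⟩
  · exact absurd rfl hne
  · show (rs.map List.length).foldl min r0.length = w
    have h0 : r0.length = w := hw r0 (by simp)
    rcases hm : rs.map List.length with _ | ⟨y, ys⟩
    · simpa using h0
    · rw [← hm, foldl_min_const (rs.map List.length) w r0.length ?_ (by rw [hm]; simp), h0, min_self]
      intro x hx
      obtain ⟨row, hrow, hlen⟩ := List.mem_map.mp hx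
      rw [← hlen]
      exact hw row (by simp [hrow])

theorem map_getD_col (g : List (List String)) (c : Nat) :
    g.map (fun row => row.getD c ".") = colPre g c g.length := by
  apply List.ext_getElem
  · simp [colPre_length]
  · intro i h1 h2
    simp only [List.length_map] at h1
    simp [colPre, get2, List.getD_eq_getElem?_getD, List.getElem?_eq_getElem h1]

theorem transposeB_rect (w : Nat) (g : List (List String)) (hw : RectW w g) (hne : g ≠ []) :
    transposeB g = (List.range w).map (fun c => colPre g c g.length) := by
  rw [transposeB, minLenB_rect w g hw hne]
  exact List.map_congr_left (fun c _ => map_getD_col g c)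

theorem northB_char (w : Nat) (g : List (List String)) (hw : RectW w g) (hpos : 0 < w)
    (hne : g ≠ []) :
    northB g = (List.range g.length).map (fun r =>
      (List.range w).map (fun c => (packB (colPre g c g.length)).getD r ".")) := by
  rw [northB, transposeB_rect w g hw hne, List.map_map]
  set M := (List.range w).map (packB ∘ fun c => colPre g c g.length) with hM
  have hrect : RectW g.length M := by
    intro row hrow
    rw [hM] at hrow
    obtain ⟨c, _, hc⟩ := List.mem_map.mp hrow
    rw [← hc]
    simp [packB_length, colPre_length]
  have hne2 : M ≠ [] := by
    have : M.length = w := by simp [hM]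
    intro hcon
    rw [hcon] at this
    simp at this
    omega
  rw [transposeB, minLenB_rect g.length M hrect hne2]
  apply List.map_congr_left
  intro r _
  rw [hM, List.map_map]
  rfl

theorem slideNorthA_B (w : Nat) (g : List (List String)) (hw : RectW w g) (hpos : 0 < w) :
    slideNorthA g = northB g := by
  rcases eq_or_ne g [] with rfl | hne
  · rfl
  obtain ⟨nR, nL, nI⟩ := northOuter w g.length g hw rfl g.length le_rfl
  rw [← slideNorthA_eq] at nR nL nI
  rw [northB_char w g hw hpos hne]
  apply List.ext_getElem
  · simp [nL]
  · intro r h1 h2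
    have hrH : r < g.length := by rw [← nL]; exact h1
    rw [List.getElem_map, List.getElem_range]
    apply List.ext_getElem
    · rw [List.length_map, List.length_range]
      exact nR _ (List.getElem_mem h1)
    · intro c hc1 hc2
      rw [List.getElem_map, List.getElem_range]
      have hcw : c < w := by
        rw [nR _ (List.getElem_mem h1)] at hc1
        exact hc1
      have hcol := (nI c hcw).2
      have hval : get2 (slideNorthA g) r c = (packB (colPre g c g.length)).getD r "." := by
        rw [← colPre_getD (slideNorthA g) c g.length r hrH, hcol, packB_render]
      rw [← hval, get2, List.getD_eq_getElem _ [] (by omega), List.getD_eq_getElem _ "." hc1]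

-- ---- south is north on the vertically flipped grid ----
theorem get2_reverse (g : List (List String)) (r c : Nat) (h : r < g.length) :
    get2 g.reverse r c = get2 g (g.length - 1 - r) c := by
  rw [get2, get2, getD_reverse g r [] h]

theorem set2_reverse (g : List (List String)) (r c : Nat) (v : String) (h : r < g.length) :
    set2 g.reverse r c v = (set2 g (g.length - 1 - r) c v).reverse := by
  rw [set2, set2, getD_reverse g r [] h, reverse_set g (g.length - 1 - r) _ (by omega),
    show g.length - 1 - (g.length - 1 - r) = r from by omega]

theorem scanDown_le (g : List (List String)) (H c : Nat) :
    ∀ k, 1 ≤ k → k ≤ H → scanDown g H c k ≤ H - 1 := by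
  intro k
  induction hk : H - k generalizing k with
  | zero =>
    intro h1 h2
    rw [scanDown, if_neg (by omega)]
    omega
  | succ n ih =>
    intro h1 h2
    rw [scanDown, if_pos (by omega)]
    split_ifs
    · exact ih (k + 1) (by omega) (by omega) (by omega)
    · omega

theorem scanDown_mirror (g : List (List String)) (H c : Nat) (hg : g.length = H) :
    ∀ r, r < H → scanUp g.reverse c r = H - 1 - scanDown g H c (H - r) := by
  intro r
  induction r with
  | zero =>
    intro _
    rw [Nat.sub_zero, scanDown, if_neg (by omega)]
    simp [scanUp]
  | succ r ih =>
    intro hr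
    have hcell : get2 g.reverse r c = get2 g (H - 1 - r) c := by
      rw [get2_reverse g r c (by omega), hg]
    rw [show H - (r + 1) = H - 1 - r from by omega, scanDown,
      if_pos (show H - 1 - r < H by omega), scanUp, hcell]
    by_cases hdot : get2 g (H - 1 - r) c = "."
    · rw [if_pos hdot, if_pos hdot, show H - 1 - r + 1 = H - r from by omega]
      exact ih (by omega)
    · rw [if_neg hdot, if_neg hdot]
      omega

theorem stepSA_length (g : List (List String)) (r c : Nat) :
    (stepSA r g c).length = g.length := by
  rw [stepSA]; split_ifs <;> simp [length_set2]

theorem stepNA_reverse (H : Nat) (cur : List (List String)) (hc : cur.length = H)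
    (r : Nat) (hr : r < H) (c : Nat) :
    stepNA r cur.reverse c = (stepSA (H - 1 - r) cur c).reverse := by
  have hget : get2 cur.reverse r c = get2 cur (H - 1 - r) c := by
    rw [get2_reverse cur r c (by omega), hc]
  rw [stepNA, stepSA, hget, hc]
  by_cases hO : get2 cur (H - 1 - r) c = "O"
  · rw [if_pos hO, if_pos hO, show H - 1 - r + 1 = H - r from by omega]
    have hscan : scanUp cur.reverse c r = H - 1 - scanDown cur H c (H - r) :=
      scanDown_mirror cur H c hc r hr
    have hσle : scanDown cur H c (H - r) ≤ H - 1 :=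
      scanDown_le cur H c (H - r) (by omega) (by omega)
    rw [set2_reverse cur r c "." (by omega), hscan, hc,
      set2_reverse (set2 cur (H - 1 - r) c ".") _ c "O" (by rw [length_set2]; omega),
      length_set2, hc, show H - 1 - (H - 1 - scanDown cur H c (H - r)) = scanDown cur H c (H - r)
        from by omega]
  · rw [if_neg hO, if_neg hO]

theorem foldl_pres_length (step : List (List String) → Nat → List (List String))
    (hstep : ∀ g c, (step g c).length = g.length) :
    ∀ (cs : List Nat) (g : List (List String)), (cs.foldl step g).length = g.length := by
  intro cs
  induction cs with
  | nil => intro g; rfl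
  | cons c cs ih => intro g; rw [List.foldl_cons, ih, hstep]

theorem innerNS_rev (H : Nat) : ∀ (cs : List Nat) (cur : List (List String)),
    cur.length = H → ∀ r, r < H →
    cs.foldl (stepNA r) cur.reverse = (cs.foldl (stepSA (H - 1 - r)) cur).reverse := by
  intro cs
  induction cs with
  | nil => intro cur _ r _; rfl
  | cons c cs ih =>
    intro cur hc r hr
    rw [List.foldl_cons, List.foldl_cons, stepNA_reverse H cur hc r hr c,
      ih _ (by rw [stepSA_length, hc]) r hr]

theorem outerNS_rev (H : Nat) : ∀ (rs : List Nat), (∀ r ∈ rs, r < H) →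
    ∀ (cur : List (List String)), cur.length = H →
    rs.foldl (fun g1 r => (List.range ((g1.getD r []).length)).foldl (stepNA r) g1) cur.reverse
      = ((rs.map (fun r => H - 1 - r)).foldl (fun g1 r =>
          (List.range ((g1.getD r []).length)).foldl (stepSA r) g1) cur).reverse := by
  intro rs
  induction rs with
  | nil => intro _ cur _; rfl
  | cons r rs ih =>
    intro hmem cur hc
    have hr : r < H := hmem r (by simp)
    rw [List.map_cons, List.foldl_cons, List.foldl_cons,
      show cur.reverse.getD r [] = cur.getD (H - 1 - r) [] from by
        rw [getD_reverse cur r [] (by omega), hc],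
      innerNS_rev H _ cur hc r hr,
      ih (fun x hx => hmem x (by simp [hx])) _
        (by rw [foldl_pres_length (stepSA (H - 1 - r)) (fun g c => stepSA_length g _ c), hc])]

theorem slideSouthA_mirror (g : List (List String)) :
    slideSouthA g = (slideNorthA g.reverse).reverse := by
  rw [slideNorthA_eq, slideSouthA_eq, List.length_reverse,
    outerNS_rev g.length (List.range g.length) (fun r hr => List.mem_range.mp hr) g rfl,
    map_rho_range, List.reverse_reverse]

theorem slideSouthA_B (w : Nat) (g : List (List String)) (hw : RectW w g) (hpos : 0 < w) :
    slideSouthA g = southB g := by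
  rw [slideSouthA_mirror, southB,
    slideNorthA_B w g.reverse (fun row hrow => hw row (List.mem_reverse.mp hrow)) hpos]

-- ---- the load computation: fold over indices = sum over enumerate ----
def msum : List (List String) → Int → Int
  | [], _ => 0
  | row :: rs, K => ((row.count "O" : Nat) : Int) * K + msum rs (K - 1)

theorem foldl_add_int (F : Nat → Int) :
    ∀ (l : List Nat) (a : Int), l.foldl (fun res r => res + F r) a = a + (l.map F).sum := by
  intro l
  induction l with
  | nil => intro a; simp
  | cons x xs ih => intro a; rw [List.foldl_cons, List.map_cons, List.sum_cons, ih]; ring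

theorem gensumA : ∀ (t : List (List String)) (K : Int),
    ((List.range t.length).map (fun r => ((t.getD r []).count "O" : Nat) * (K - (r : Int)))).sum
      = msum t K := by
  intro t
  induction t with
  | nil => intro K; simp [msum]
  | cons row rs ih =>
    intro K
    rw [List.length_cons, List.range_succ_eq_map, List.map_cons, List.sum_cons, List.map_map]
    have hmap : (List.range rs.length).map
        ((fun r => (((row :: rs).getD r []).count "O" : Nat) * (K - (r : Int))) ∘ Nat.succ)
        = (List.range rs.length).map
          (fun r => ((rs.getD r []).count "O" : Nat) * ((K - 1) - (r : Int))) := by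
      apply List.map_congr_left
      intro r _
      simp only [Function.comp, Nat.succ_eq_add_one, List.getD_cons_succ]
      push_cast
      ring_nf
    rw [hmap, ih (K - 1), msum]
    simp

theorem gensumB : ∀ (t : List (List String)) (s K : Int),
    ((PySem.List.enumerate t s).map (fun p => (K - p.1) * ((p.2.count "O" : Nat) : Int))).sum
      = msum t (K - s) := by
  intro t
  induction t with
  | nil => intro s K; simp [PySem.List.enumerate_nil, msum]
  | cons row rs ih =>
    intro s K
    rw [PySem.List.enumerate_cons, List.map_cons, List.sum_cons, ih (s + 1) K, msum]
    ring_nf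

theorem calc_eq (t : List (List String)) : calcA t = loadB t := by
  rw [calcA, loadB]
  rw [foldl_add_int (fun r => (((t.getD r []).count "O" : Nat) : Int) * ((t.length : Int) - (r : Int)))]
  rw [zero_add]
  have h1 := gensumA t (t.length : Int)
  have h2 := gensumB t 0 (t.length : Int)
  rw [sub_zero] at h2
  rw [h1, h2]

-- ---- 'no O anywhere': every slide is the identity / preserves the property ----
theorem getD_cases {α : Type} (l : List α) (n : Nat) (d : α) : l.getD n d = d ∨ l.getD n d ∈ l := by
  by_cases h : n < l.length
  · exact Or.inr (List.getD_eq_getElem l d h ▸ List.getElem_mem h)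
  · exact Or.inl (List.getD_eq_default l d (by omega))

theorem noO_get2 (g : List (List String)) (r c : Nat) (hN : NoO g) : get2 g r c ≠ "O" := by
  rw [get2]
  rcases getD_cases g r [] with h | h
  · rw [h]; simp
  · rcases getD_cases (g.getD r []) c "." with h2 | h2
    · rw [h2]; simp
    · exact hN _ h _ h2

theorem foldl_fix {α β : Type} (step : α → β → α) (a : α) (h : ∀ x, step a x = a) :
    ∀ l : List β, l.foldl step a = a := by
  intro l
  induction l with
  | nil => rfl
  | cons x xs ih => rw [List.foldl_cons, h x]; exact ih

theorem slideNorthA_noO (g : List (List String)) (hN : NoO g) : slideNorthA g = g := by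
  rw [slideNorthA_eq]
  refine foldl_fix _ g (fun r => ?_) _
  refine foldl_fix _ g (fun c => ?_) _
  rw [stepNA, if_neg (noO_get2 g r c hN)]

theorem slideSouthA_noO (g : List (List String)) (hN : NoO g) : slideSouthA g = g := by
  rw [slideSouthA_eq]
  refine foldl_fix _ g (fun r => ?_) _
  refine foldl_fix _ g (fun c => ?_) _
  rw [stepSA, if_neg (noO_get2 g r c hN)]

theorem render_foldl_noO : ∀ (l : List String) (st : List String × Nat × Nat),
    (∀ v ∈ l, v ≠ "O") → st.2.1 = 0 → render (l.foldl packStep st) = render st ++ l := by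
  intro l
  induction l with
  | nil => intro st _ _; simp
  | cons v vs ih =>
    intro st hl ho
    rw [List.foldl_cons]
    have hvO : v ≠ "O" := hl v (by simp)
    by_cases hv : v = "."
    · subst hv
      rw [ih _ (fun x hx => hl x (by simp [hx]))
        (by rw [packStep, if_neg (by decide), if_pos rfl]; exact ho), render_step_dot]
      simp
    · rw [ih _ (fun x hx => hl x (by simp [hx])) (by rw [packStep, if_neg hvO, if_neg hv]),
        render_step_wall st v hvO hv]
      simp

theorem packB_noO (l : List String) (h : ∀ v ∈ l, v ≠ "O") : packB l = l := by
  rw [packB_render, pst, render_foldl_noO l ([], 0, 0) h rfl]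
  rfl

theorem westB_noO (g : List (List String)) (hN : NoO g) : westB g = g := by
  rw [westB]
  have : g.map packB = g.map (fun row => row) :=
    List.map_congr_left (fun row hrow => packB_noO row (hN row hrow))
  rw [this, List.map_id']

theorem eastB_noO (g : List (List String)) (hN : NoO g) : eastB g = g := by
  rw [eastB]
  have : g.map (fun row => (packB row.reverse).reverse) = g.map (fun row => row) :=
    List.map_congr_left (fun row hrow => by
      rw [packB_noO row.reverse (fun v hv => hN row hrow v (List.mem_reverse.mp hv)),
        List.reverse_reverse])
  rw [this, List.map_id']

theorem transposeB_noO (g : List (List String)) (hN : NoO g) : NoO (transposeB g) := by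
  intro x hx v hv
  rw [transposeB] at hx
  obtain ⟨c, _, hc⟩ := List.mem_map.mp hx
  rw [← hc] at hv
  obtain ⟨row, hrow, hval⟩ := List.mem_map.mp hv
  rcases getD_cases row c "." with h | h
  · rw [← hval, h]; simp
  · rw [← hval]; exact hN row hrow _ h

theorem northB_noO (g : List (List String)) (hN : NoO g) : NoO (northB g) := by
  rw [northB]
  have h1 := transposeB_noO g hN
  have : (transposeB g).map packB = (transposeB g).map (fun row => row) :=
    List.map_congr_left (fun row hrow => packB_noO row (h1 row hrow))
  rw [this, List.map_id']
  exact transposeB_noO _ h1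

theorem noO_reverse (g : List (List String)) (hN : NoO g) : NoO g.reverse :=
  fun row hrow => hN row (List.mem_reverse.mp hrow)

theorem southB_noO (g : List (List String)) (hN : NoO g) : NoO (southB g) := by
  rw [southB]
  exact noO_reverse _ (northB_noO _ (noO_reverse g hN))

theorem calcA_noO (t : List (List String)) (hN : NoO t) : calcA t = 0 := by
  rw [calcA, foldl_add_int, zero_add]
  apply List.sum_eq_zero
  intro x hx
  obtain ⟨r, hr, hval⟩ := List.mem_map.mp hx
  rw [List.mem_range] at hr
  have : (t.getD r []).count "O" = 0 :=
    List.count_eq_zero.mpr (fun hmem => hN _ (row_mem t r hr) _ hmem rfl)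
  rw [← hval, this]
  simp

-- ---- rectangularity is preserved by B's slides ----
theorem westB_rect (w : Nat) (g : List (List String)) (hw : RectW w g) : RectW w (westB g) := by
  intro row hrow
  obtain ⟨r0, hr0, hval⟩ := List.mem_map.mp hrow
  rw [← hval, packB_length]
  exact hw r0 hr0

theorem eastB_rect (w : Nat) (g : List (List String)) (hw : RectW w g) : RectW w (eastB g) := by
  intro row hrow
  obtain ⟨r0, hr0, hval⟩ := List.mem_map.mp hrow
  rw [← hval]
  simp [packB_length]
  exact hw r0 hr0

theorem northB_rect (w : Nat) (g : List (List String)) (hw : RectW w g) (hpos : 0 < w) :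
    RectW w (northB g) := by
  rcases eq_or_ne g [] with rfl | hne
  · intro row hrow
    have hnil : northB ([] : List (List String)) = [] := rfl
    rw [hnil] at hrow
    simp at hrow
  · rw [northB_char w g hw hpos hne]
    intro row hrow
    obtain ⟨r, _, hval⟩ := List.mem_map.mp hrow
    rw [← hval]
    simp

theorem southB_rect (w : Nat) (g : List (List String)) (hw : RectW w g) (hpos : 0 < w) :
    RectW w (southB g) := by
  rw [southB]
  intro row hrow
  rw [List.mem_reverse] at hrow
  exact northB_rect w g.reverse (fun x hx => hw x (List.mem_reverse.mp hx)) hpos row hrow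

-- ---- one full spin cycle ----
def A4 (t : List (List String)) : List (List String) :=
  slideEastA (slideSouthA (slideWestA (slideNorthA t)))

def B4 (t : List (List String)) : List (List String) :=
  eastB (southB (westB (northB t)))

def Rrel (t t' : List (List String)) : Prop :=
  (t = t' ∧ ∃ w, 0 < w ∧ RectW w t) ∨ (NoO t ∧ NoO t')

theorem cycle_main (t t' : List (List String)) (hR : Rrel t t') :
    calcA (A4 t) = loadB (B4 t') ∧ Rrel (A4 t) (B4 t') := by
  rcases hR with ⟨rfl, w, hpos, hw⟩ | ⟨hN, hN'⟩
  · have e1 := slideNorthA_B w t hw hpos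
    have r1 := northB_rect w t hw hpos
    have e2 := slideWestA_B (northB t)
    have r2 := westB_rect w _ r1
    have e3 := slideSouthA_B w (westB (northB t)) r2 hpos
    have r3 := southB_rect w _ r2 hpos
    have e4 := slideEastA_B (southB (westB (northB t)))
    have r4 := eastB_rect w _ r3
    have hAB : A4 t = B4 t := by rw [A4, B4, e1, e2, e3, e4]
    exact ⟨by rw [hAB, calc_eq], Or.inl ⟨hAB, w, hpos, hAB ▸ r4⟩⟩
  · have hA4 : A4 t = t := by
      rw [A4, slideNorthA_noO t hN, slideWestA_B, westB_noO t hN, slideSouthA_noO t hN,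
        slideEastA_B, eastB_noO t hN]
    have hB4 : NoO (B4 t') := by
      have h1 := northB_noO t' hN'
      have h2 : NoO (westB (northB t')) := by rw [westB_noO _ h1]; exact h1
      have h3 := southB_noO _ h2
      rw [B4, eastB_noO _ h3]
      exact h3
    refine ⟨?_, Or.inr ⟨by rw [hA4]; exact hN, hB4⟩⟩
    rw [hA4, calcA_noO t hN, ← calc_eq, calcA_noO _ hB4]

-- ---- the period check and final lookup on the reversed history ----
theorem beq_reverse (a b : List Int) : (a == b) = (a.reverse == b.reverse) := by simp

theorem sliceA_from (sb : List Int) (p : Int) (hp : 0 < p) :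
    PySem.List.slice sb (some (-p)) none = sb.drop (sb.length - p.toNat) := by
  rw [show -p = -((p.toNat : Nat) : Int) by omega]
  exact PySem.List.slice_from_neg_natCast sb p.toNat (by omega)

theorem sliceA_mid (sb : List Int) (p : Int) (hp : 0 < p) :
    PySem.List.slice sb (some (-2 * p)) (some (-p))
      = (sb.drop (sb.length - 2 * p.toNat)).take
          ((sb.length - p.toNat) - (sb.length - 2 * p.toNat)) := by
  rw [show -2 * p = -(((2 * p.toNat) : Nat) : Int) by push_cast; omega,
    show -p = -((p.toNat : Nat) : Int) by omega]
  rw [PySem.List.slice, PySem.List.clampIdx_neg_natCast _ _ (by omega : 0 < p.toNat),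
    PySem.List.clampIdx_neg_natCast _ _ (by omega : 0 < 2 * p.toNat)]

theorem cond_mirror (sb : List Int) (p : Int) (hp : 5 < p) :
    checkPeriodA sb p
      = (PySem.List.slice sb.reverse none (some p)
          == PySem.List.slice sb.reverse (some p) (some (2 * p))) := by
  set n := sb.length with hn
  set q := p.toNat with hq
  have hq0 : 0 < q := by omega
  rw [checkPeriodA, sliceA_from sb p (by omega), sliceA_mid sb p (by omega),
    PySem.List.slice_to _ (by omega : (0:Int) ≤ p),
    PySem.List.slice_toNat _ (by omega : (0:Int) ≤ p) (by omega : (0:Int) ≤ 2 * p),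
    show (2 * p).toNat = 2 * q by omega]
  rw [List.take_reverse, List.drop_reverse, List.take_reverse, ← beq_reverse]
  congr 1
  have hlen : (List.take (n - q) sb).length = n - q := by
    rw [List.length_take]
    omega
  rw [hlen, List.drop_take, show n - q - (2 * q - q) = n - 2 * q by omega,
    show n - q - (n - 2 * q) = (n - q) - (n - q - (2 * q - q)) by omega]

theorem break_val (sb : List Int) (p idx : Int) (hp : 5 < p) (hne : sb ≠ [])
    (hidx0 : 0 ≤ idx) (hidx : idx < p)
    (hcond : PySem.List.slice sb (some (-p)) none = PySem.List.slice sb (some (-2 * p)) (some (-p))) :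
    PySem.List.pyGetD (PySem.List.slice sb (some (-p)) none) idx 0
      = PySem.List.pyGetD sb.reverse (p - 1 - idx) 0 := by
  set n := sb.length with hn
  set q := p.toNat with hq
  have hn1 : 0 < n := by cases sb <;> simp_all
  rw [sliceA_from sb p (by omega), sliceA_mid sb p (by omega)] at hcond
  have hql : q ≤ n := by
    by_contra hcon
    have := congrArg List.length hcond
    simp only [List.length_drop, List.length_take] at this
    omega
  have hlend : (sb.drop (n - q)).length = q := by
    rw [List.length_drop]
    omega
  rw [sliceA_from sb p (by omega)]
  rw [PySem.List.pyGetD_eq_getElem _ _ hidx0 (by simp; omega),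
    PySem.List.pyGetD_eq_getElem _ _ (by omega) (by simp; omega)]
  rw [List.getElem_drop, List.getElem_reverse]
  congr 1
  omega

-- ---- the cycle-detection loops agree ----
theorem loop_eq : ∀ (fuel : Nat) (t t' : List (List String)) (sb : List Int) (m i c : Int),
    Rrel t t' → sb ≠ [] → loopA t sb m i c fuel = loopB t' sb.reverse m i c fuel := by
  intro fuel
  induction fuel with
  | zero => intros; rfl
  | succ fuel ih =>
    intro t t' sb m i c hR hne
    obtain ⟨hcalc, hR4⟩ := cycle_main t t' hR
    simp only [loopA, loopB]
    rw [show slideEastA (slideSouthA (slideWestA (slideNorthA t))) = A4 t from rfl,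
      show eastB (southB (westB (northB t'))) = B4 t' from rfl, ← hcalc]
    by_cases h1 : calcA (A4 t) < m
    · rw [if_pos h1, if_pos h1,
        show calcA (A4 t) :: sb.reverse = (sb ++ [calcA (A4 t)]).reverse by simp]
      exact ih _ _ _ _ _ _ hR4 (by simp)
    · rw [if_neg h1, if_neg h1]
      by_cases h2 : calcA (A4 t) = m ∧ c + 1 - i > 5
      · rw [if_pos h2, if_pos h2, cond_mirror sb (c + 1 - i) (by omega)]
        by_cases h3 : (PySem.List.slice sb.reverse none (some (c + 1 - i))
            == PySem.List.slice sb.reverse (some (c + 1 - i)) (some (2 * (c + 1 - i)))) = true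
        · rw [if_pos h3, if_pos h3]
          have hlist : PySem.List.slice sb (some (-(c + 1 - i))) none
              = PySem.List.slice sb (some (-2 * (c + 1 - i))) (some (-(c + 1 - i))) := by
            have hb : checkPeriodA sb (c + 1 - i) = true := by
              rw [cond_mirror sb (c + 1 - i) (by omega)]
              exact h3
            rw [checkPeriodA] at hb
            exact eq_of_beq hb
          exact break_val sb (c + 1 - i) _ (by omega) hne
            (PySem.Int.mod_nonneg _ (by omega)) (PySem.Int.mod_lt _ (by omega)) hlist
        · rw [if_neg h3, if_neg h3,
            show calcA (A4 t) :: sb.reverse = (sb ++ [calcA (A4 t)]).reverse by simp]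
          exact ih _ _ _ _ _ _ hR4 (by simp)
      · rw [if_neg h2, if_neg h2,
          show calcA (A4 t) :: sb.reverse = (sb ++ [calcA (A4 t)]).reverse by simp]
        exact ih _ _ _ _ _ _ hR4 (by simp)

-- ===== VERDICT (by name: the statement is the Claim_ definition above) =====
theorem part2_spec : Claim_equal_part2 := by
  intro input hD hP
  unfold Spec_part2 part2 part2_alt
  rw [calc_eq]
  have hRR : Rrel input input := by
    rcases hP with hrect | hnoO
    · by_cases hw : 0 < (input.headD []).length
      · exact Or.inl ⟨rfl, (input.headD []).length, hw, fun row hrow => hrect row hrow⟩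
      · right
        have hz : ∀ row ∈ input, row = [] := by
          intro row hrow
          have := hrect row hrow
          rw [List.eq_nil_iff_length_eq_zero]
          omega
        constructor <;>
          exact fun row hrow v hv => absurd (hz row hrow ▸ hv) (List.not_mem_nil)
    · exact Or.inr ⟨hnoO, hnoO⟩
  exact loop_eq pvFuel input input [loadB input] _ 0 0 hRR (by simp)
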